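-- pv_equiv track=rewrite | github.com/jack7141/StudyProject | code_test/Practice/기능개발.py | solution
-- ===== SOURCE A (Python) =====
-- def solution(M, load):
--     len_load = len(load)
--     load = sorted(load, reverse=True)
--     move_load = [0] * len_load
--     answer = 0
--     ok = True
--     for weight in load:
--         if weight > M:
--             ok = False
--             break
--     if ok:
--         for index in range(len_load):
--             sum_load = load[index]
--             move_load[index] = 1
--             for index_end in range(len(load) - 1, -1, -1):
--                 if move_load[index_end]:
--                     continue
--                 else:
--                     if sum_load + load[index_end] <= M:
--                         sum_load += load[index_end]
--                         move_load[index_end] = 1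
--                     else:
--                         break
--             answer += 1
--             if sum(move_load) == len_load:
--                 break
--     else:
--         answer = -1
--     return answer
-- ===== SOURCE B (Python) =====
-- def solution(M, load):
--     # Two-pointer greedy on the descending-sorted list: each bin takes the
--     # largest remaining item plus as many of the smallest remaining as fit.
--     w = sorted(load, reverse=True)
--     if any(x > M for x in w):
--         return -1
--     i, j, answer = 0, len(w) - 1, 0
--     while i <= j:
--         s = w[i]
--         while j > i and s + w[j] <= M:
--             s += w[j]
--             j -= 1
--         i += 1
--         answer += 1
--     return answer
-- ===== Notes on version B (the rewrite author's own statement) =====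
-- stated objective: alternative
-- what changed: Replaces A's outer loop over a move_load flag array (which rescans the array from the end and re-sums it for every bin) with a single two-pointer greedy sweep over the same descending-sorted list, so no flag array, rescan or sum exists at all.
import Mathlib
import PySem

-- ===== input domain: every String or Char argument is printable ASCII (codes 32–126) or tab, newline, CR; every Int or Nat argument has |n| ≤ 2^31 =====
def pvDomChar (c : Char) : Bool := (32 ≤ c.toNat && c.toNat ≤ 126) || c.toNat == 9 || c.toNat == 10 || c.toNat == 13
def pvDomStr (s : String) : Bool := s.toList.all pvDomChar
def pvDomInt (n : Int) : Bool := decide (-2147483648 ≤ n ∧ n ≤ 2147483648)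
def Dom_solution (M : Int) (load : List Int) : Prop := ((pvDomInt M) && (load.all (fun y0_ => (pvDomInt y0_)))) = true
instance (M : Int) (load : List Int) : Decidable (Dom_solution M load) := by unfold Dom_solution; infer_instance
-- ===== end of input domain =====

-- B replaces A's per-bin rescan (and re-summing) of the move_load flag array by a
-- two-pointer greedy pass over the same descending-sorted list (objective: alternative).

-- ===== PORT A =====
-- the 'for weight in load: if weight > M: ok = False; break' loop (returns ok)
def checkOkA (M : Int) : List Int → Bool
  | [] => true
  | x :: xs => if x > M then false else checkOkA M xs

-- inner 'for index_end in range(len(load)-1,-1,-1)' loop over the given index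
-- list, with continue/break; state = (sum_load, move_load).
-- load[index_end] / move_load[index_end] are always in range here, so getD is exact.
def innerA (M : Int) (w : List Int) : List Nat → Int → List Int → Int × List Int
  | [], s, move => (s, move)
  | d :: ds, s, move =>
    if move.getD d 0 ≠ 0 then innerA M w ds s move
    else if s + w.getD d 0 ≤ M then innerA M w ds (s + w.getD d 0) (move.set d 1)
    else (s, move)

-- outer 'for index in range(len_load)' loop with the sum(move_load)==len_load break
def outerA (M : Int) (w : List Int) (n : Nat) : List Nat → List Int → Int → Int
  | [], _, ans => ans
  | d :: ds, move, ans =>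
    let move1 := move.set d 1
    let r := innerA M w ((List.range n).reverse) (w.getD d 0) move1
    if r.2.sum = (n : Int) then ans + 1
    else outerA M w n ds r.2 (ans + 1)

def solution (M : Int) (load : List Int) : Int :=
  let n := load.length
  let w := PySem.List.sorted load (fun x => x) true
  if checkOkA M w then outerA M w n (List.range n) (List.replicate n (0 : Int)) 0
  else -1

-- ===== PORT B =====
-- the 'while j > i and s + w[j] <= M' loop; returns the final j (w[j] always in
-- range here, so getD is exact). The loop runs at most (j - i) times, so the
-- fuel (j - i).toNat makes the structural recursion compute exactly the while loop.
def altInnerGo (M : Int) (w : List Int) (i : Int) : Nat → Int → Int → Int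
  | 0, _, j => j
  | fuel + 1, s, j =>
    if i < j ∧ s + w.getD j.toNat 0 ≤ M then altInnerGo M w i fuel (s + w.getD j.toNat 0) (j - 1)
    else j

def altInner (M : Int) (w : List Int) (i : Int) (s : Int) (j : Int) : Int :=
  altInnerGo M w i (j - i).toNat s j

-- the 'while i <= j' loop: i increases and stays ≤ j + 1, so the fuel
-- (j + 1 - i).toNat makes the structural recursion compute exactly the while loop
def altOuterGo (M : Int) (w : List Int) : Nat → Int → Int → Int → Int
  | 0, _, _, ans => ans
  | fuel + 1, i, j, ans =>
    if i ≤ j then altOuterGo M w fuel (i + 1) (altInner M w i (w.getD i.toNat 0) j) (ans + 1)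
    else ans

def altOuter (M : Int) (w : List Int) (i j ans : Int) : Int :=
  altOuterGo M w (j + 1 - i).toNat i j ans

def solution_alt (M : Int) (load : List Int) : Int :=
  let w := PySem.List.sorted load (fun x => x) true
  if w.any (fun x => decide (M < x)) then -1
  else altOuter M w 0 ((w.length : Int) - 1) 0

-- ===== PRECONDITION & SPEC =====
def Spec_solution (M : Int) (load : List Int) (out : Int) : Prop := out = solution_alt M load
instance (M : Int) (load : List Int) (out : Int) : Decidable (Spec_solution M load out) := by unfold Spec_solution; infer_instance

-- ===== CLAIM (what is proved, stated in full; the proofs are below) =====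
def Claim_equal_solution : Prop := ∀ (M : Int) (load : List Int), Dom_solution M load → Spec_solution M load (solution M load)

-- ===== LEMMAS AND PROOFS =====

-- altInner satisfies the while-loop unfolding equation
theorem altInner_eq (M : Int) (w : List Int) (i s j : Int) :
    altInner M w i s j
      = if i < j ∧ s + w.getD j.toNat 0 ≤ M then altInner M w i (s + w.getD j.toNat 0) (j - 1)
        else j := by
  unfold altInner
  by_cases hc : i < j ∧ s + w.getD j.toNat 0 ≤ M
  · rw [if_pos hc]
    rw [show (j - i).toNat = (j - 1 - i).toNat + 1 from by omega]
    simp only [altInnerGo]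
    rw [if_pos hc]
  · rw [if_neg hc]
    cases (j - i).toNat with
    | zero => rfl
    | succ k =>
      simp only [altInnerGo]
      rw [if_neg hc]

theorem altInner_le (M : Int) (w : List Int) (i s j : Int) : altInner M w i s j ≤ j := by
  unfold altInner
  have H : ∀ (f : Nat) (s j : Int), altInnerGo M w i f s j ≤ j := by
    intro f
    induction f with
    | zero => intro s j; exact le_rfl
    | succ f ihf =>
      intro s j
      simp only [altInnerGo]
      by_cases hc : i < j ∧ s + w.getD j.toNat 0 ≤ M
      · rw [if_pos hc]
        have := ihf (s + w.getD j.toNat 0) (j - 1)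
        omega
      · rw [if_neg hc]
  exact H _ s j

theorem altInner_ge (M : Int) (w : List Int) (i s j : Int) (h : i ≤ j) :
    i ≤ altInner M w i s j := by
  unfold altInner
  have H : ∀ (f : Nat) (s j : Int), i ≤ j → i ≤ altInnerGo M w i f s j := by
    intro f
    induction f with
    | zero => intro s j hij; exact hij
    | succ f ihf =>
      intro s j hij
      simp only [altInnerGo]
      by_cases hc : i < j ∧ s + w.getD j.toNat 0 ≤ M
      · rw [if_pos hc]
        exact ihf (s + w.getD j.toNat 0) (j - 1) (by omega)
      · rw [if_neg hc]; exact hij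
  exact H _ s j h

-- any sufficient fuel computes the same outer loop result
theorem altOuterGo_irrel (M : Int) (w : List Int) :
    ∀ (f g : Nat) (i j ans : Int), (j + 1 - i).toNat ≤ f → (j + 1 - i).toNat ≤ g →
      altOuterGo M w f i j ans = altOuterGo M w g i j ans := by
  intro f
  induction f with
  | zero =>
    intro g i j ans hf hg
    cases g with
    | zero => rfl
    | succ g =>
      simp only [altOuterGo]
      rw [if_neg (by omega)]
  | succ f ihf =>
    intro g i j ans hf hg
    cases g with
    | zero =>
      simp only [altOuterGo]
      rw [if_neg (by omega)]
    | succ g =>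
      simp only [altOuterGo]
      by_cases hc : i ≤ j
      · rw [if_pos hc, if_pos hc]
        have h1 := altInner_le M w i (w.getD i.toNat 0) j
        have h2 := altInner_ge M w i (w.getD i.toNat 0) j hc
        exact ihf g (i + 1) _ (ans + 1) (by omega) (by omega)
      · rw [if_neg hc, if_neg hc]

-- altOuter satisfies the while-loop unfolding equation
theorem altOuter_eq (M : Int) (w : List Int) (i j ans : Int) :
    altOuter M w i j ans
      = if i ≤ j then altOuter M w (i + 1) (altInner M w i (w.getD i.toNat 0) j) (ans + 1)
        else ans := by
  unfold altOuter
  by_cases hc : i ≤ j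
  · rw [if_pos hc]
    rw [show (j + 1 - i).toNat = (j - i).toNat + 1 from by omega]
    simp only [altOuterGo]
    rw [if_pos hc]
    have h1 := altInner_le M w i (w.getD i.toNat 0) j
    have h2 := altInner_ge M w i (w.getD i.toNat 0) j hc
    exact altOuterGo_irrel M w (j - i).toNat _ (i + 1) _ (ans + 1) (by omega) (by omega)
  · rw [if_neg hc]
    cases (j + 1 - i).toNat with
    | zero => rfl
    | succ k =>
      simp only [altOuterGo]
      rw [if_neg hc]

-- the move_load array when exactly the positions in [a,b] are still unmoved
def pat (n : Nat) (a b : Int) : List Int :=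
  (List.range n).map (fun (k : Nat) => if a ≤ (k : Int) ∧ (k : Int) ≤ b then 0 else 1)

theorem pat_getD (n : Nat) (a b : Int) (k : Nat) (hk : k < n) :
    (pat n a b).getD k 0 = if a ≤ (k : Int) ∧ (k : Int) ≤ b then 0 else 1 := by
  simp [pat, List.getD, hk]

theorem pat_set_left (n : Nat) (i j : Int) (hi : 0 ≤ i) :
    (pat n i j).set i.toNat 1 = pat n (i + 1) j := by
  apply List.ext_getElem
  · simp [pat, List.length_set]
  · intro k h1 _
    rw [List.getElem_set]
    simp only [pat, List.getElem_map, List.getElem_range]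
    split_ifs <;> omega

theorem pat_set_right (n : Nat) (i j : Int) (hi : 0 ≤ i) (hij : i < j) :
    (pat n (i + 1) j).set j.toNat 1 = pat n (i + 1) (j - 1) := by
  apply List.ext_getElem
  · simp [pat, List.length_set]
  · intro k h1 _
    rw [List.getElem_set]
    simp only [pat, List.getElem_map, List.getElem_range]
    split_ifs <;> omega

theorem pat_sum_le (n : Nat) (a b : Int) : (pat n a b).sum ≤ n := by
  induction n with
  | zero => simp [pat]
  | succ m ih =>
    simp only [pat, List.range_succ, List.map_append, List.sum_append, List.map_cons,
      List.map_nil, List.sum_cons, List.sum_nil] at *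
    split_ifs <;> omega

theorem pat_sum_lt (n : Nat) (a b : Int) (ha : 0 ≤ a) (hab : a ≤ b) (hb : b < n) :
    (pat n a b).sum < n := by
  induction n with
  | zero => omega
  | succ m ih =>
    have hle := pat_sum_le m a b
    simp only [pat, List.range_succ, List.map_append, List.sum_append, List.map_cons,
      List.map_nil, List.sum_cons, List.sum_nil] at *
    by_cases h : a ≤ (m : Int) ∧ (m : Int) ≤ b
    · rw [if_pos h]; omega
    · rw [if_neg h]
      have : b < (m : Int) := by omega
      have := ih (by omega)
      omega

theorem pat_sum_of_gt (n : Nat) (a b : Int) (h : b < a) : (pat n a b).sum = n := by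
  induction n with
  | zero => simp [pat]
  | succ m ih =>
    simp only [pat, List.range_succ, List.map_append, List.sum_append, List.map_cons,
      List.map_nil, List.sum_cons, List.sum_nil] at *
    rw [if_neg (by omega)]
    omega

theorem pat_replicate (n : Nat) : List.replicate n (0 : Int) = pat n 0 ((n : Int) - 1) := by
  apply List.ext_getElem
  · simp [pat]
  · intro k h1 h2
    simp only [pat, List.getElem_replicate, List.getElem_map, List.getElem_range]
    simp only [List.length_replicate] at h1
    rw [if_pos (by omega)]

-- skipping a block of indices that are already moved
theorem innerA_skip (M : Int) (w : List Int) (ds es : List Nat) (s : Int) (move : List Int)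
    (h : ∀ d ∈ ds, move.getD d 0 ≠ 0) :
    innerA M w (ds ++ es) s move = innerA M w es s move := by
  induction ds with
  | nil => rfl
  | cons d ds ih =>
    simp only [List.cons_append, innerA, if_pos (h d List.mem_cons_self)]
    exact ih (fun d' hd' => h d' (List.mem_cons_of_mem _ hd'))

-- the fully-moved case: scanning from index i down over moved entries changes nothing
theorem inner_spec_eq (M : Int) (w : List Int) (n : Nat) (i s : Int)
    (hi : 0 ≤ i) (hin : i < (n : Int)) :
    (innerA M w ((List.range (i.toNat + 1)).reverse) s (pat n (i + 1) i)).2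
      = pat n (i + 1) (altInner M w i s i) := by
  have hskip : innerA M w ((List.range (i.toNat + 1)).reverse ++ []) s (pat n (i + 1) i)
      = innerA M w [] s (pat n (i + 1) i) := by
    apply innerA_skip
    intro d hd
    simp only [List.mem_reverse, List.mem_range] at hd
    rw [pat_getD n (i + 1) i d (by omega), if_neg (by omega)]
    simp
  rw [List.append_nil] at hskip
  rw [hskip, innerA, altInner_eq, if_neg (by omega)]

-- the inner scan from index j down, with [i+1, j] unmoved, moves exactly [j'+1, j]
-- where j' is what the two-pointer inner loop returns
theorem inner_spec (M : Int) (w : List Int) (n : Nat) :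
    ∀ (fuel : Nat) (j i s : Int), (j - i).toNat ≤ fuel → 0 ≤ i → i ≤ j → j < (n : Int) →
      (innerA M w ((List.range (j.toNat + 1)).reverse) s (pat n (i + 1) j)).2
        = pat n (i + 1) (altInner M w i s j) := by
  intro fuel
  induction fuel with
  | zero =>
    intro j i s hf hi _ hjn
    have hji : j = i := by omega
    subst hji
    exact inner_spec_eq M w n j s hi hjn
  | succ m ih =>
    intro j i s hf hi hij hjn
    by_cases hlt : i < j
    · have hcons : (List.range (j.toNat + 1)).reverse = j.toNat :: (List.range j.toNat).reverse := by
        rw [List.range_succ]; simp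
      rw [hcons, innerA]
      have hval : (pat n (i + 1) j).getD j.toNat 0 = 0 := by
        rw [pat_getD n (i + 1) j j.toNat (by omega), if_pos (by constructor <;> omega)]
      rw [hval, if_neg (by simp)]
      by_cases hfit : s + w.getD j.toNat 0 ≤ M
      · rw [if_pos hfit, pat_set_right n i j hi hlt]
        have h1 : (List.range j.toNat).reverse = (List.range ((j - 1).toNat + 1)).reverse := by
          congr 2; omega
        rw [h1, ih (j - 1) i (s + w.getD j.toNat 0) (by omega) hi (by omega) (by omega)]
        conv_rhs => rw [altInner_eq, if_pos ⟨hlt, hfit⟩]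
      · rw [if_neg hfit]
        conv_rhs => rw [altInner_eq, if_neg (by tauto)]
    · have hji : j = i := by omega
      subst hji
      exact inner_spec_eq M w n j s hi hjn

-- one step of the remaining outer index list
theorem drop_range_cons (n k : Nat) (h : k < n) :
    (List.range n).drop k = k :: (List.range n).drop (k + 1) := by
  rw [List.drop_eq_getElem_cons (by simpa using h)]
  simp

-- decomposing the full downward scan into the already-moved tail and the scan from j
theorem range_reverse_split (n : Nat) (j : Int) (hj : 0 ≤ j) (hjn : j < (n : Int)) :
    (List.range n).reverse
      = ((List.range (n - (j.toNat + 1))).map (fun x => j.toNat + 1 + x)).reverse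
        ++ (List.range (j.toNat + 1)).reverse := by
  have h : List.range n
      = List.range (j.toNat + 1) ++ (List.range (n - (j.toNat + 1))).map (fun x => j.toNat + 1 + x) := by
    conv_lhs => rw [show n = (j.toNat + 1) + (n - (j.toNat + 1)) from by omega]
    exact List.range_add
  rw [h, List.reverse_append]

-- main loop invariant: processing indices i, i+1, … with [i, j] unmoved
theorem outer_spec (M : Int) (w : List Int) (n : Nat) :
    ∀ (fuel : Nat) (i j ans : Int), (j - i).toNat ≤ fuel → 0 ≤ i → i ≤ j → j < (n : Int) →
      outerA M w n ((List.range n).drop i.toNat) (pat n i j) ans = altOuter M w i j ans := by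
  intro fuel
  induction fuel with
  | zero =>
    intro i j ans hf hi hij hjn
    -- fuel 0 forces j = i
    have hji : j = i := by omega
    subst hji
    rw [drop_range_cons n j.toNat (by omega)]
    simp only [outerA]
    rw [pat_set_left n j j hi]
    rw [range_reverse_split n j hi hjn]
    rw [innerA_skip M w _ _ _ _ (by
      intro d hd
      simp only [List.mem_reverse, List.mem_map, List.mem_range] at hd
      obtain ⟨x, _, rfl⟩ := hd
      rw [pat_getD n (j + 1) j _ (by omega), if_neg (by omega)]
      simp)]
    rw [inner_spec_eq M w n j (w.getD j.toNat 0) hi hjn]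
    have hj' : altInner M w j (w.getD j.toNat 0) j = j := by
      rw [altInner_eq, if_neg (by omega)]
    rw [hj', pat_sum_of_gt n (j + 1) j (by omega), if_pos rfl]
    rw [altOuter_eq, if_pos le_rfl, altOuter_eq, if_neg (by
      have := altInner_le M w j (w.getD j.toNat 0) j
      have := altInner_ge M w j (w.getD j.toNat 0) j le_rfl
      omega)]
  | succ m ih =>
    intro i j ans hf hi hij hjn
    rw [drop_range_cons n i.toNat (by omega)]
    simp only [outerA]
    rw [pat_set_left n i j hi]
    rw [range_reverse_split n j (by omega) hjn]
    rw [innerA_skip M w _ _ _ _ (by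
      intro d hd
      simp only [List.mem_reverse, List.mem_map, List.mem_range] at hd
      obtain ⟨x, _, rfl⟩ := hd
      rw [pat_getD n (i + 1) j _ (by omega), if_neg (by omega)]
      simp)]
    have hcast : (i.toNat : Int) = i := by omega
    rw [hcast] at *
    rw [inner_spec M w n (j - i).toNat j i (w.getD i.toNat 0) le_rfl hi hij hjn]
    set j' := altInner M w i (w.getD i.toNat 0) j with hj'def
    have hj'le : j' ≤ j := altInner_le M w i (w.getD i.toNat 0) j
    have hj'ge : i ≤ j' := altInner_ge M w i (w.getD i.toNat 0) j hij
    by_cases hdone : j' = i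
    · rw [hdone, pat_sum_of_gt n (i + 1) i (by omega), if_pos rfl]
      rw [altOuter_eq, if_pos hij, altOuter_eq]
      rw [← hj'def, hdone, if_neg (by omega)]
    · have hlt : (pat n (i + 1) j').sum < (n : Int) := by
        exact_mod_cast pat_sum_lt n (i + 1) j' (by omega) (by omega) (by omega)
      rw [if_neg (by omega)]
      have hdrop : i.toNat + 1 = (i + 1).toNat := by omega
      rw [hdrop, ih (i + 1) j' (ans + 1) (by omega) (by omega) (by omega) (by omega)]
      conv_rhs => rw [altOuter_eq, if_pos hij]

theorem checkOkA_eq_not_any (M : Int) (w : List Int) :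
    checkOkA M w = !(w.any (fun x => decide (M < x))) := by
  induction w with
  | nil => rfl
  | cons x xs ih =>
    simp only [checkOkA, List.any_cons, Bool.not_or]
    by_cases h : x > M
    · rw [if_pos h]; simp [h]
    · rw [if_neg h, ih]; simp [show ¬ M < x from h]

-- ===== VERDICT (by name: the statement is the Claim_ definition above) =====
theorem solution_spec : Claim_equal_solution := by
  intro M load _
  unfold Spec_solution
  simp only [solution, solution_alt]
  rw [checkOkA_eq_not_any]
  by_cases hany : (PySem.List.sorted load (fun x => x) true).any (fun x => decide (M < x))
  · rw [hany]; simp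
  · rw [Bool.not_eq_true] at hany
    rw [hany]
    simp only [Bool.not_false, if_true, Bool.false_eq_true, if_false]
    have hlen : (PySem.List.sorted load (fun x => x) true).length = load.length :=
      List.Perm.length_eq (PySem.List.sorted_perm load (fun x => x) true)
    set w := PySem.List.sorted load (fun x => x) true with hw
    rw [← hlen]
    rcases Nat.eq_zero_or_pos w.length with h0 | hpos
    · rw [h0]
      simp only [List.range_zero, List.replicate_zero, outerA]
      rw [altOuter_eq, if_neg (by omega)]
    · rw [pat_replicate]
      have := outer_spec M w w.length w.length 0 ((w.length : Int) - 1) 0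
        (by omega) le_rfl (by omega) (by omega)
      simpa using this
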